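-- pv_equiv track=rewrite | github.com/miliar/Code_Jam_Webscraper | solutions_python/Problem_96/1727.py | MaxGooglers
-- ===== SOURCE A (Python) =====
-- import math
--
-- def IsSurprising(scorelist):
--     if math.fabs(scorelist[0] - scorelist[2]) >= 2:
--         return True
--     return False
--
-- def MaxGooglers(N, S, p, dataset):
--
--     max = 0
--
--     for score in dataset:
--         scores = PossibleScores(int(score))
--         triplet = ValidTriplet(scores, p, S)
--         if triplet != None:
--             if IsSurprising(triplet) == True:
--                 S -= 1
--                 max += 1
--             else:
--                 max += 1
--
--     return max
--
-- def PossibleScores(score):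
--     scores = []
--
--     for i in range(11):
--         for j in range(11):
--             for k in range(11):
--                 newscore = [i, j, k]
--                 newscore.sort()
--
--                 # Check if all numbers are within the desired range
--                 if math.fabs(newscore[0] - newscore[2]) <= 2 and (i + j + k) == score:
--
--                     if (newscore in scores) == False:
--                         scores.append(newscore)
--
--     return scores
--
-- def ValidTriplet(scores, p, S):
--
--     # Scan for non surprising
--     for scorelist in scores:
--         if scorelist[2] >= p and IsSurprising(scorelist) == False:
--             return scorelist
--
--     # Scan for surprising
--     for scorelist in scores:
--         if scorelist[2] >= p and IsSurprising(scorelist) == True and S > 0: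
--             return scorelist
--
--     return None
-- ===== SOURCE B (Python) =====
-- # Same result via O(1) arithmetic per total: best non-surprising max is (t+2)//3,
-- # best surprising max is (t+4)//3 (valid only for 2 <= t <= 28), instead of
-- # enumerating all 11^3 triplets per score.
-- def MaxGooglers(N, S, p, dataset):
--     count = 0
--     for score in dataset:
--         t = int(score)
--         if 0 <= t <= 30 and (t + 2) // 3 >= p:
--             count += 1
--         elif 2 <= t <= 28 and (t + 4) // 3 >= p and S > 0:
--             S -= 1
--             count += 1
--     return count
-- ===== Notes on version B (the rewrite author's own statement) =====
-- stated objective: faster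
-- what changed: B replaces A's per-score enumeration of all 11^3 candidate triplets (with sorting, dedup and two scans) by O(1) arithmetic per score: a score t admits a qualifying non-surprising triplet iff 0 <= t <= 30 and (t+2)//3 >= p, and otherwise a surprising one iff 2 <= t <= 28 and (t+4)//3 >= p.
import Mathlib
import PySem

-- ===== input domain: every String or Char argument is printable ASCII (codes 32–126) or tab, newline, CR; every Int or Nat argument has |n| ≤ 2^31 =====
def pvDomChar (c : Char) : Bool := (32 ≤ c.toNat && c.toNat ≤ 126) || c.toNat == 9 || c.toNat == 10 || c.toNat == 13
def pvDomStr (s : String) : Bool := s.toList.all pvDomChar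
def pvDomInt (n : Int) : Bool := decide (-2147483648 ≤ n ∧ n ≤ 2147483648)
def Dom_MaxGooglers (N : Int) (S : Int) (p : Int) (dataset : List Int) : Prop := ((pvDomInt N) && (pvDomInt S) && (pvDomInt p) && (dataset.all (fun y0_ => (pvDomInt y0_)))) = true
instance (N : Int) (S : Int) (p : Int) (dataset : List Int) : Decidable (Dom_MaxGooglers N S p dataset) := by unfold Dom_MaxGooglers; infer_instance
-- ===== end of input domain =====

-- B replaces A's per-score enumeration of all 11^3 triplets by O(1) arithmetic per score
-- (best non-surprising top score is (t+2)//3, best surprising one is (t+4)//3 for 2 ≤ t ≤ 28); objective: faster.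


-- ===== PORT A =====
-- math.fabs(x - y) compared with an integer literal is ported as |x - y| (exact: the arguments are ints here).
-- scorelist[0] / scorelist[2] are ported with pyGetD 0: every list reaching them has length 3, so this is exact.
def IsSurprising (scorelist : List Int) : Bool :=
  if 2 ≤ |PySem.List.pyGetD scorelist 0 0 - PySem.List.pyGetD scorelist 2 0| then true else false

def PossibleScores (score : Int) : List (List Int) :=
  (PySem.List.pyRange 0 11 1).foldl (fun scores i =>
    (PySem.List.pyRange 0 11 1).foldl (fun scores j =>
      (PySem.List.pyRange 0 11 1).foldl (fun scores k =>
        let newscore := PySem.List.sorted [i, j, k] id false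
        if |PySem.List.pyGetD newscore 0 0 - PySem.List.pyGetD newscore 2 0| ≤ 2 ∧ i + j + k = score then
          if scores.contains newscore = false then scores ++ [newscore] else scores
        else scores) scores) scores) []

-- ValidTriplet's two 'for … if cond: return scorelist' loops, as structural recursions
def ScanNonSurprising (p : Int) : List (List Int) → Option (List Int)
  | [] => none
  | scorelist :: rest =>
    if PySem.List.pyGetD scorelist 2 0 ≥ p ∧ IsSurprising scorelist = false then some scorelist
    else ScanNonSurprising p rest

def ScanSurprising (p S : Int) : List (List Int) → Option (List Int)
  | [] => none
  | scorelist :: rest =>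
    if PySem.List.pyGetD scorelist 2 0 ≥ p ∧ IsSurprising scorelist = true ∧ S > 0 then some scorelist
    else ScanSurprising p S rest

def ValidTriplet (scores : List (List Int)) (p S : Int) : Option (List Int) :=
  match ScanNonSurprising p scores with
  | some scorelist => some scorelist
  | none => ScanSurprising p S scores

-- the loop body of MaxGooglers, over the loop-carried state (S, max); int(score) on an int is the identity
def MaxGooglersStep (p : Int) (st : Int × Int) (score : Int) : Int × Int :=
  match ValidTriplet (PossibleScores score) p st.1 with
  | some triplet => if IsSurprising triplet = true then (st.1 - 1, st.2 + 1) else (st.1, st.2 + 1)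
  | none => st

def MaxGooglers (N : Int) (S : Int) (p : Int) (dataset : List Int) : Int :=
  (dataset.foldl (MaxGooglersStep p) (S, 0)).2

-- ===== PORT B =====
def MaxGooglersAltStep (p : Int) (st : Int × Int) (score : Int) : Int × Int :=
  let t := score
  if 0 ≤ t ∧ t ≤ 30 ∧ p ≤ PySem.Int.floordiv (t + 2) 3 then (st.1, st.2 + 1)
  else if 2 ≤ t ∧ t ≤ 28 ∧ p ≤ PySem.Int.floordiv (t + 4) 3 ∧ 0 < st.1 then (st.1 - 1, st.2 + 1)
  else st

def MaxGooglers_alt (N : Int) (S : Int) (p : Int) (dataset : List Int) : Int :=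
  (dataset.foldl (MaxGooglersAltStep p) (S, 0)).2

-- ===== PRECONDITION & SPEC =====
def Spec_MaxGooglers (N : Int) (S : Int) (p : Int) (dataset : List Int) (out : Int) : Prop := out = MaxGooglers_alt N S p dataset
instance (N : Int) (S : Int) (p : Int) (dataset : List Int) (out : Int) : Decidable (Spec_MaxGooglers N S p dataset out) := by unfold Spec_MaxGooglers; infer_instance

-- ===== CLAIM (what is proved, stated in full; the proofs are below) =====
def Claim_equal_MaxGooglers : Prop := ∀ (N : Int) (S : Int) (p : Int) (dataset : List Int), Dom_MaxGooglers N S p dataset → Spec_MaxGooglers N S p dataset (MaxGooglers N S p dataset)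

-- ===== LEMMAS AND PROOFS =====

lemma pyGetD_three_two (a b c d : Int) : PySem.List.pyGetD [a, b, c] 2 d = c := rfl
lemma pyGetD_three_zero (a b c d : Int) : PySem.List.pyGetD [a, b, c] 0 d = a := rfl

lemma foldl_fix {α β : Type} {f : α → β → α} {l : List β} {a : α}
    (h : ∀ b x, x ∈ l → f b x = b) : l.foldl f a = a := by
  induction l generalizing a with
  | nil => rfl
  | cons y ys ih =>
    simp only [List.foldl_cons, h a y (by simp)]
    exact ih (fun b x hx => h b x (by simp [hx]))

lemma possibleScores_empty (t : Int) (ht : t < 0 ∨ 30 < t) : PossibleScores t = [] := by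
  unfold PossibleScores
  apply foldl_fix
  intro b i hi
  apply foldl_fix
  intro b' j hj
  apply foldl_fix
  intro b'' k hk
  rw [PySem.List.mem_pyRange_one] at hi hj hk
  simp only
  rw [if_neg]
  rintro ⟨-, hsum⟩
  omega
set_option maxRecDepth 4096 in
lemma ps0 : PossibleScores 0 = [[0,0,0]] := by decide
set_option maxRecDepth 4096 in
lemma ps1 : PossibleScores 1 = [[0,0,1]] := by decide
set_option maxRecDepth 4096 in
lemma ps2 : PossibleScores 2 = [[0,0,2], [0,1,1]] := by decide
set_option maxRecDepth 4096 in
lemma ps3 : PossibleScores 3 = [[0,1,2], [1,1,1]] := by decide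
set_option maxRecDepth 4096 in
lemma ps4 : PossibleScores 4 = [[0,2,2], [1,1,2]] := by decide
set_option maxRecDepth 4096 in
lemma ps5 : PossibleScores 5 = [[1,1,3], [1,2,2]] := by decide
set_option maxRecDepth 4096 in
lemma ps6 : PossibleScores 6 = [[1,2,3], [2,2,2]] := by decide
set_option maxRecDepth 4096 in
lemma ps7 : PossibleScores 7 = [[1,3,3], [2,2,3]] := by decide
set_option maxRecDepth 4096 in
lemma ps8 : PossibleScores 8 = [[2,2,4], [2,3,3]] := by decide
set_option maxRecDepth 4096 in
lemma ps9 : PossibleScores 9 = [[2,3,4], [3,3,3]] := by decide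
set_option maxRecDepth 4096 in
lemma ps10 : PossibleScores 10 = [[2,4,4], [3,3,4]] := by decide
set_option maxRecDepth 4096 in
lemma ps11 : PossibleScores 11 = [[3,3,5], [3,4,4]] := by decide
set_option maxRecDepth 4096 in
lemma ps12 : PossibleScores 12 = [[3,4,5], [4,4,4]] := by decide
set_option maxRecDepth 4096 in
lemma ps13 : PossibleScores 13 = [[3,5,5], [4,4,5]] := by decide
set_option maxRecDepth 4096 in
lemma ps14 : PossibleScores 14 = [[4,4,6], [4,5,5]] := by decide
set_option maxRecDepth 4096 in
lemma ps15 : PossibleScores 15 = [[4,5,6], [5,5,5]] := by decide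
set_option maxRecDepth 4096 in
lemma ps16 : PossibleScores 16 = [[4,6,6], [5,5,6]] := by decide
set_option maxRecDepth 4096 in
lemma ps17 : PossibleScores 17 = [[5,5,7], [5,6,6]] := by decide
set_option maxRecDepth 4096 in
lemma ps18 : PossibleScores 18 = [[5,6,7], [6,6,6]] := by decide
set_option maxRecDepth 4096 in
lemma ps19 : PossibleScores 19 = [[5,7,7], [6,6,7]] := by decide
set_option maxRecDepth 4096 in
lemma ps20 : PossibleScores 20 = [[6,6,8], [6,7,7]] := by decide
set_option maxRecDepth 4096 in
lemma ps21 : PossibleScores 21 = [[6,7,8], [7,7,7]] := by decide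
set_option maxRecDepth 4096 in
lemma ps22 : PossibleScores 22 = [[6,8,8], [7,7,8]] := by decide
set_option maxRecDepth 4096 in
lemma ps23 : PossibleScores 23 = [[7,7,9], [7,8,8]] := by decide
set_option maxRecDepth 4096 in
lemma ps24 : PossibleScores 24 = [[7,8,9], [8,8,8]] := by decide
set_option maxRecDepth 4096 in
lemma ps25 : PossibleScores 25 = [[7,9,9], [8,8,9]] := by decide
set_option maxRecDepth 4096 in
lemma ps26 : PossibleScores 26 = [[8,8,10], [8,9,9]] := by decide
set_option maxRecDepth 4096 in
lemma ps27 : PossibleScores 27 = [[8,9,10], [9,9,9]] := by decide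
set_option maxRecDepth 4096 in
lemma ps28 : PossibleScores 28 = [[8,10,10], [9,9,10]] := by decide
set_option maxRecDepth 4096 in
lemma ps29 : PossibleScores 29 = [[9,10,10]] := by decide
set_option maxRecDepth 4096 in
lemma ps30 : PossibleScores 30 = [[10,10,10]] := by decide

lemma step_eq (p : Int) (st : Int × Int) (t : Int) :
    MaxGooglersStep p st t = MaxGooglersAltStep p st t := by
  by_cases h : 0 ≤ t ∧ t ≤ 30
  · obtain ⟨h0, h30⟩ := h
    interval_cases t <;>
      · simp only [MaxGooglersStep, MaxGooglersAltStep,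
          ps0, ps1, ps2, ps3, ps4, ps5, ps6, ps7, ps8, ps9, ps10, ps11, ps12, ps13, ps14, ps15,
          ps16, ps17, ps18, ps19, ps20, ps21, ps22, ps23, ps24, ps25, ps26, ps27, ps28, ps29, ps30]
        norm_num [ValidTriplet, ScanNonSurprising, ScanSurprising, IsSurprising,
          pyGetD_three_two, pyGetD_three_zero, PySem.Int.floordiv_eq_ediv_of_pos]
        split_ifs <;> first | rfl | omega
  · rw [MaxGooglersStep, MaxGooglersAltStep, possibleScores_empty t (by omega)]
    simp only [ValidTriplet, ScanNonSurprising, ScanSurprising]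
    rw [if_neg (by omega), if_neg (by omega)]

-- ===== VERDICT (by name: the statement is the Claim_ definition above) =====
theorem MaxGooglers_spec : Claim_equal_MaxGooglers := by
  intro N S p dataset _
  unfold Spec_MaxGooglers MaxGooglers MaxGooglers_alt
  have hstep : MaxGooglersStep p = MaxGooglersAltStep p :=
    funext fun st => funext fun t => step_eq p st t
  rw [hstep]
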